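-- pv_equiv track=rewrite | github.com/SasCezar/SoftwareTopics | scripts/python/json2csv_taxonomy.py | assign_annotator
-- ===== SOURCE A (Python) =====
-- import string
--
-- def assign_annotator(annotators, elements):
--     res = []
--     num = elements // annotators
--     last = None
--     for a in string.ascii_uppercase[:annotators]:
--         res.extend([a] * num)
--         last = a
--
--     if len(res) < elements:
--         res.extend([last] * abs(len(res) - elements))
--
--     return res
-- ===== SOURCE B (Python) =====
-- import string
--
-- def assign_annotator(annotators, elements):
--     letters = string.ascii_uppercase[:annotators]
--     num = elements // annotators
--     n = max(elements, 0)
--     if n == 0: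
--         return []
--     if num <= 0:
--         return [letters[-1]] * n
--     return [letters[min(i // num, len(letters) - 1)] for i in range(n)]
-- ===== Notes on version B (the rewrite author's own statement) =====
-- stated objective: alternative
-- what changed: B replaces A's per-letter block-extension loop (extend res by [a]*num per letter, then pad with the last letter) by a single comprehension over output positions computing each label as letters[min(i//num, len(letters)-1)], with the no-full-block case handled by one replicate of the last letter.
-- intended difference: When annotators is negative (with at least one letter, i.e. annotators >= -25) and elements <= annotators, A's floor division makes num positive and A returns a full block list of min(26+annotators,26)*num labels even though a negative number of elements was requested; B returns [], the intended result for a non-positive element count. — e.g. on assign_annotator(-25, -25): A returns ["A"], B returns []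
-- outside the precondition, e.g. on assign_annotator(-30, 2): A returns [None, None], B raises IndexError
import Mathlib
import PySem

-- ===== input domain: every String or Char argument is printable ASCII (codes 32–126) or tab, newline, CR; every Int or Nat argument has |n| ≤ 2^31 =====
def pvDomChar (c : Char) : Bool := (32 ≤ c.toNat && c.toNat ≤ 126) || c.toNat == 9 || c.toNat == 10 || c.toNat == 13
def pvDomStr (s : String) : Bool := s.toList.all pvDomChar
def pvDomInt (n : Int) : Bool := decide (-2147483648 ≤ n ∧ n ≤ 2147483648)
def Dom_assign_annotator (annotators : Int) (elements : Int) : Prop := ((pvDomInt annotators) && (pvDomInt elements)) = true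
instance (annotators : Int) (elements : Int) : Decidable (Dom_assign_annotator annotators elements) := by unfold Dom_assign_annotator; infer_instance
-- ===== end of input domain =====

-- B assigns each output position its label by clamped integer division instead of A's per-letter
-- block-extension loop; on negative annotators with elements <= annotators A returns an accidental
-- block list while B returns [] (stated as D_ below).


-- ===== PORT A =====
def pvUpper : List Char := "ABCDEFGHIJKLMNOPQRSTUVWXYZ".toList

-- the 'for a in string.ascii_uppercase[:annotators]' loop: state = (res, last)
def pvLoopA (num : Int) : List Char → List String × Option String → List String × Option String
  | [], st => st
  | c :: cs, st => pvLoopA num cs (st.1 ++ List.replicate num.toNat (String.ofList [c]), some (String.ofList [c]))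

def assign_annotator (annotators : Int) (elements : Int) : List String :=
  let num := PySem.Int.floordiv elements annotators
  let st := pvLoopA num (PySem.List.slice pvUpper none (some annotators)) ([], none)
  if (st.1.length : Int) < elements then
    -- st.2 = none only when no letter was seen; there Python appends None (not a str) — outside Pre_; "" is a placeholder
    st.1 ++ List.replicate (((st.1.length : Int) - elements).natAbs) (st.2.getD "")
  else st.1

-- ===== PORT B =====
def assign_annotator_alt (annotators : Int) (elements : Int) : List String :=
  let letters := PySem.List.slice pvUpper none (some annotators)
  let num := PySem.Int.floordiv elements annotators
  let n := max elements 0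
  if n = 0 then []
  else if num ≤ 0 then
    -- letters[-1]: none only when letters = [] (outside Pre_), where Python B raises IndexError
    List.replicate n.toNat (match PySem.List.pyGet? letters (-1) with | some c => String.ofList [c] | none => "")
  else
    (PySem.List.pyRange 0 n 1).map (fun i =>
      match PySem.List.pyGet? letters (min (PySem.Int.floordiv i num) ((letters.length : Int) - 1)) with
      | some c => String.ofList [c] | none => "")

-- ===== PRECONDITION & SPEC =====
-- Pre_ excludes annotators = 0, where A raises ZeroDivisionError, and annotators ≤ -26 with
-- elements > 0, where A returns a list containing None (not a list of str; B's natural code raises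
-- IndexError there on letters[-1] of an empty letter string).
def Pre_assign_annotator (annotators : Int) (elements : Int) : Prop :=
  annotators ≠ 0 ∧ (-25 ≤ annotators ∨ elements ≤ 0)
instance (annotators : Int) (elements : Int) : Decidable (Pre_assign_annotator annotators elements) := by unfold Pre_assign_annotator; infer_instance
def pvWitness_assign_annotator : Int × Int := (2, 5)

-- On -25 ≤ annotators < 0 with elements ≤ annotators, A's floor division makes num positive and A
-- returns a full block list of labels although a negative number of elements was requested; B
-- returns [], the intended result for a non-positive element count.
def D_assign_annotator (annotators : Int) (elements : Int) : Prop :=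
  -25 ≤ annotators ∧ annotators ≤ -1 ∧ elements ≤ annotators
instance (annotators : Int) (elements : Int) : Decidable (D_assign_annotator annotators elements) := by unfold D_assign_annotator; infer_instance

def Spec_assign_annotator (annotators : Int) (elements : Int) (out : List String) : Prop :=
  ¬ D_assign_annotator annotators elements → out = assign_annotator_alt annotators elements
instance (annotators : Int) (elements : Int) (out : List String) : Decidable (Spec_assign_annotator annotators elements out) := by unfold Spec_assign_annotator; infer_instance

def pvDiffWitness_assign_annotator : Int × Int := (-25, -25)
def pvDiffWitnessOut_assign_annotator : (List String) × (List String) := (["A"], [])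

-- ===== CLAIM (what is proved, stated in full; the proofs are below) =====
def Claim_unchanged_assign_annotator : Prop := ∀ (annotators : Int) (elements : Int), Dom_assign_annotator annotators elements → Pre_assign_annotator annotators elements → Spec_assign_annotator annotators elements (assign_annotator annotators elements)
def Claim_changed_assign_annotator : Prop := Dom_assign_annotator (pvDiffWitness_assign_annotator.1) (pvDiffWitness_assign_annotator.2) ∧ Pre_assign_annotator (pvDiffWitness_assign_annotator.1) (pvDiffWitness_assign_annotator.2) ∧ D_assign_annotator (pvDiffWitness_assign_annotator.1) (pvDiffWitness_assign_annotator.2) ∧ assign_annotator (pvDiffWitness_assign_annotator.1) (pvDiffWitness_assign_annotator.2) = pvDiffWitnessOut_assign_annotator.1 ∧ assign_annotator_alt (pvDiffWitness_assign_annotator.1) (pvDiffWitness_assign_annotator.2) = pvDiffWitnessOut_assign_annotator.2 ∧ pvDiffWitnessOut_assign_annotator.1 ≠ pvDiffWitnessOut_assign_annotator.2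
def Claim_exact_assign_annotator : Prop := ∀ (annotators : Int) (elements : Int), Dom_assign_annotator annotators elements → Pre_assign_annotator annotators elements → D_assign_annotator annotators elements → assign_annotator annotators elements ≠ assign_annotator_alt annotators elements

-- ===== LEMMAS AND PROOFS =====

theorem pvLoopA_eq (num : Int) (cs : List Char) (res : List String) (last : Option String) :
    pvLoopA num cs (res, last) =
      (res ++ cs.flatMap (fun c => List.replicate num.toNat (String.ofList [c])),
       cs.foldl (fun _ c => some (String.ofList [c])) last) := by
  induction cs generalizing res last with
  | nil => simp [pvLoopA]
  | cons c cs ih => simp [pvLoopA, ih, List.flatMap_cons, List.append_assoc]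

theorem pvFoldlLast (cs : List Char) (h : cs ≠ []) (init : Option String) :
    cs.foldl (fun _ c => some (String.ofList [c])) init = some (String.ofList [cs.getLast h]) := by
  induction cs generalizing init with
  | nil => exact absurd rfl h
  | cons c cs ih =>
    cases cs with
    | nil => simp
    | cons d ds => simpa using ih (by simp) (some (String.ofList [c]))

theorem pvFlatLen (ls : List Char) (k : Nat) :
    (ls.flatMap fun c => List.replicate k (String.ofList [c])).length = ls.length * k := by
  induction ls with
  | nil => simp
  | cons c cs ih => simp [ih, Nat.succ_mul, Nat.add_comm]

theorem pvBlocksEqMap (ls : List Char) (h : ls ≠ []) (k nn : Nat) (hk : 1 ≤ k)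
    (hle : ls.length * k ≤ nn) :
    ls.flatMap (fun c => List.replicate k (String.ofList [c])) ++
      List.replicate (nn - ls.length * k) (String.ofList [ls.getLast h]) =
    (List.range nn).map (fun i => String.ofList [ls.getD (min (i / k) (ls.length - 1)) 'A']) := by
  induction ls generalizing nn with
  | nil => exact absurd rfl h
  | cons c cs ih =>
    cases cs with
    | nil =>
      have h1 : ∀ i ∈ List.range nn,
          String.ofList [([c] : List Char).getD (min (i / k) (([c] : List Char).length - 1)) 'A'] =
          String.ofList [c] := by
        intro i _; simp
      rw [List.map_congr_left h1]
      have hlast : ([c] : List Char).getLast h = c := rfl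
      rw [hlast, List.map_const', List.length_range]
      simp only [List.flatMap_cons, List.flatMap_nil, List.append_nil, List.length_singleton,
        Nat.one_mul]
      rw [← List.replicate_add]
      congr 1
      simp only [List.length_singleton, Nat.one_mul] at hle
      omega
    | cons d ds =>
      have hs : (c :: d :: ds).length * k = (d :: ds).length * k + k := by
        simp [List.length_cons, Nat.succ_mul]
      have hkle : k ≤ nn := by omega
      have hle' : (d :: ds).length * k ≤ nn - k := by omega
      have hnn : nn = k + (nn - k) := by omega
      rw [hnn, List.range_add, List.map_append, List.map_map]
      have h1 : ∀ i ∈ List.range k,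
          String.ofList [(c :: d :: ds).getD (min (i / k) ((c :: d :: ds).length - 1)) 'A'] =
          String.ofList [c] := by
        intro i hi
        rw [List.mem_range] at hi
        rw [Nat.div_eq_of_lt hi]
        simp
      have h2 : ∀ i ∈ List.range (nn - k),
          ((fun i => String.ofList [(c :: d :: ds).getD (min (i / k) ((c :: d :: ds).length - 1)) 'A']) ∘
            (k + ·)) i =
          String.ofList [(d :: ds).getD (min (i / k) ((d :: ds).length - 1)) 'A'] := by
        intro i _
        simp only [Function.comp_apply]
        have hdiv : (k + i) / k = i / k + 1 := by
          rw [Nat.add_comm, Nat.add_div_right _ (by omega)]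
        rw [hdiv]
        have hmin : min (i / k + 1) ((c :: d :: ds).length - 1) =
            min (i / k) ((d :: ds).length - 1) + 1 := by
          simp only [List.length_cons]
          omega
        rw [hmin, List.getD_cons_succ]
      rw [List.map_congr_left h1, List.map_congr_left h2, List.map_const', List.length_range,
        ← ih (by simp) (nn - k) hle']
      have hlast : (c :: d :: ds).getLast h = (d :: ds).getLast (by simp) :=
        List.getLast_cons (by simp)
      have hcount : k + (nn - k) - (c :: d :: ds).length * k = nn - k - (d :: ds).length * k := by
        omega
      rw [hlast, hcount, List.flatMap_cons, List.append_assoc]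

-- ---- letters of string.ascii_uppercase[:annotators] ----

theorem pvUpperLen : pvUpper.length = 26 := by decide

theorem pvLetters_nonneg (a : Int) (ha : 0 ≤ a) :
    PySem.List.slice pvUpper none (some a) = pvUpper.take a.toNat :=
  PySem.List.slice_to pvUpper ha

theorem pvLetters_neg (a : Int) (ha : a ≤ -1) :
    PySem.List.slice pvUpper none (some a) = pvUpper.take (26 - a.natAbs) := by
  have h : a = -((a.natAbs : Nat) : Int) := by omega
  rw [h, PySem.List.slice_to_neg_natCast pvUpper a.natAbs (by omega), pvUpperLen]
  congr 2
  omega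

theorem pvTakeLen (n : Nat) : (pvUpper.take n).length = min n 26 := by
  rw [List.length_take, pvUpperLen]

-- ---- sign facts about num = elements // annotators ----

theorem pvNum_nonpos (a e : Int) (ha : 1 ≤ a) (he : e ≤ 0) : PySem.Int.floordiv e a ≤ 0 := by
  have hdm := PySem.Int.floordiv_mul_add_mod e a
  have hm0 := PySem.Int.mod_nonneg e (by omega : (0:Int) < a)
  by_contra hq
  have h1 : 0 ≤ (PySem.Int.floordiv e a - 1) * a := mul_nonneg (by omega) (by omega)
  have h2 : (PySem.Int.floordiv e a - 1) * a = PySem.Int.floordiv e a * a - a := by ring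
  linarith

theorem pvNum_nonneg_mul_le (a e : Int) (ha : 1 ≤ a) (he : 0 ≤ e) :
    0 ≤ PySem.Int.floordiv e a ∧ PySem.Int.floordiv e a * a ≤ e := by
  have hdm := PySem.Int.floordiv_mul_add_mod e a
  have hm0 := PySem.Int.mod_nonneg e (by omega : (0:Int) < a)
  have hm1 := PySem.Int.mod_lt e (by omega : (0:Int) < a)
  constructor
  · by_contra hq
    have h1 : 0 ≤ (-(PySem.Int.floordiv e a) - 1) * a := mul_nonneg (by omega) (by omega)
    have h2 : (-(PySem.Int.floordiv e a) - 1) * a = -(PySem.Int.floordiv e a * a) - a := by ring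
    linarith
  · linarith

theorem pvNum_neg (a e : Int) (ha : a ≤ -1) (he : 1 ≤ e) : PySem.Int.floordiv e a ≤ -1 := by
  have hdm := PySem.Int.floordiv_mul_add_mod e a
  have hm := PySem.Int.mod_neg_bounds e (by omega : a < 0)
  by_contra hq
  have h1 : 0 ≤ PySem.Int.floordiv e a * (-a) := mul_nonneg (by omega) (by omega)
  have h2 : PySem.Int.floordiv e a * (-a) = -(PySem.Int.floordiv e a * a) := by ring
  linarith [hm.2]

theorem pvNum_zero (a e : Int) (ha : a ≤ -1) (hlt : a < e) (he : e ≤ 0) :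
    PySem.Int.floordiv e a = 0 := by
  have hdm := PySem.Int.floordiv_mul_add_mod e a
  have hm := PySem.Int.mod_neg_bounds e (by omega : a < 0)
  rcases lt_trichotomy (PySem.Int.floordiv e a) 0 with h | h | h
  · have h1 : 0 ≤ (-(PySem.Int.floordiv e a) - 1) * (-a) := mul_nonneg (by omega) (by omega)
    have h2 : (-(PySem.Int.floordiv e a) - 1) * (-a) = PySem.Int.floordiv e a * a + a := by ring
    linarith [hm.1]
  · exact h
  · have h1 : 0 ≤ (PySem.Int.floordiv e a - 1) * (-a) := mul_nonneg (by omega) (by omega)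
    have h2 : (PySem.Int.floordiv e a - 1) * (-a) = -(PySem.Int.floordiv e a * a) + a := by ring
    linarith [hm.2]

theorem pvNum_pos (a e : Int) (ha : a ≤ -1) (he : e ≤ a) : 1 ≤ PySem.Int.floordiv e a := by
  have hdm := PySem.Int.floordiv_mul_add_mod e a
  have hm := PySem.Int.mod_neg_bounds e (by omega : a < 0)
  by_contra hq
  have h1 : 0 ≤ (-(PySem.Int.floordiv e a)) * (-a) := mul_nonneg (by omega) (by omega)
  have h2 : (-(PySem.Int.floordiv e a)) * (-a) = PySem.Int.floordiv e a * a := by ring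
  linarith [hm.1]

-- ---- evaluation of the two ports, case by case ----

theorem pvA_res_nil (a e : Int)
    (h : ((PySem.Int.floordiv e a).toNat = 0) ∨ PySem.List.slice pvUpper none (some a) = []) :
    assign_annotator a e =
      (if (0:Int) < e then
        List.replicate (0 - e).natAbs
          (((PySem.List.slice pvUpper none (some a)).foldl
              (fun _ c => some (String.ofList [c])) none).getD "")
       else []) := by
  have hres : (PySem.List.slice pvUpper none (some a)).flatMap
      (fun c => List.replicate (PySem.Int.floordiv e a).toNat (String.ofList [c])) = [] := by
    rcases h with h | h <;> simp [h]
  simp only [assign_annotator, pvLoopA_eq, hres]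
  simp only [List.length_nil, Nat.cast_zero, List.nil_append]

theorem pvCaseLast (a e : Int) (he : 1 ≤ e)
    (hnum : PySem.Int.floordiv e a ≤ 0)
    (hpos : PySem.List.slice pvUpper none (some a) ≠ []) :
    assign_annotator a e = assign_annotator_alt a e := by
  have hk0 : (PySem.Int.floordiv e a).toNat = 0 := by omega
  rw [pvA_res_nil a e (Or.inl hk0), if_pos (by omega : (0:Int) < e)]
  rw [pvFoldlLast _ hpos none]
  simp only [assign_annotator_alt, if_neg (by omega : ¬ max e 0 = 0), if_pos hnum,
    PySem.List.pyGet?_neg_one, List.getLast?_eq_getLast hpos, Option.getD_some]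
  congr 1
  omega

theorem pvCaseEmpty (a e : Int) (he : e ≤ 0)
    (h : ((PySem.Int.floordiv e a).toNat = 0) ∨ PySem.List.slice pvUpper none (some a) = []) :
    assign_annotator a e = assign_annotator_alt a e := by
  have hB : assign_annotator_alt a e = [] := by
    simp only [assign_annotator_alt]
    rw [if_pos (by omega : max e 0 = 0)]
  rw [pvA_res_nil a e h, if_neg (by omega : ¬ (0:Int) < e), hB]

theorem pvCaseMain (a e : Int) (ha : 1 ≤ a) (he : 1 ≤ e)
    (hnum : 1 ≤ PySem.Int.floordiv e a) :
    assign_annotator a e = assign_annotator_alt a e := by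
  obtain ⟨ls, hls⟩ : ∃ l, l = PySem.List.slice pvUpper none (some a) := ⟨_, rfl⟩
  have hlsT : ls = pvUpper.take a.toNat := by rw [hls, pvLetters_nonneg a (by omega)]
  have hlen : ls.length = min a.toNat 26 := by rw [hlsT, pvTakeLen]
  have hpos : ls ≠ [] := List.ne_nil_of_length_pos (by omega)
  obtain ⟨k, hkc⟩ : ∃ k : Nat, ((k : Nat) : Int) = PySem.Int.floordiv e a :=
    ⟨(PySem.Int.floordiv e a).toNat, by omega⟩
  have hk1 : 1 ≤ k := by omega
  have hktoNat : (PySem.Int.floordiv e a).toNat = k := by omega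
  have hmul := pvNum_nonneg_mul_le a e ha (by omega)
  have hLa : (ls.length : Int) ≤ a := by rw [hlen]; push_cast; omega
  have hmulLe : (ls.length : Int) * k ≤ e := by
    calc (ls.length : Int) * k ≤ a * k :=
          mul_le_mul_of_nonneg_right hLa (by omega)
      _ = PySem.Int.floordiv e a * a := by rw [hkc]; ring
      _ ≤ e := hmul.2
  have hle : ls.length * k ≤ e.toNat := by
    have h3 : ((ls.length * k : Nat) : Int) ≤ ((e.toNat : Nat) : Int) := by
      push_cast
      rw [Int.toNat_of_nonneg (by omega : (0:Int) ≤ e)]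
      exact hmulLe
    exact_mod_cast h3
  have hres_len := pvFlatLen ls k
  have hA : assign_annotator a e =
      ls.flatMap (fun c => List.replicate k (String.ofList [c])) ++
        List.replicate (e.toNat - ls.length * k) (String.ofList [ls.getLast hpos]) := by
    simp only [assign_annotator, pvLoopA_eq, ← hls, hktoNat, List.nil_append,
      pvFoldlLast ls hpos none, Option.getD_some, hres_len]
    by_cases hcond : ((ls.length * k : Nat) : Int) < e
    · rw [if_pos hcond]
      congr 2
      omega
    · rw [if_neg hcond]
      have h0 : e.toNat - ls.length * k = 0 := by omega
      rw [h0, List.replicate_zero, List.append_nil]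
  have hB : assign_annotator_alt a e =
      (List.range e.toNat).map
        (fun i => String.ofList [ls.getD (min (i / k) (ls.length - 1)) 'A']) := by
    simp only [assign_annotator_alt, ← hls]
    rw [if_neg (by omega : ¬ max e 0 = 0), if_neg (by omega : ¬ PySem.Int.floordiv e a ≤ 0)]
    have hmax : max e 0 = e := by omega
    rw [hmax, PySem.List.pyRange_one, List.map_map]
    have he0 : (e - 0).toNat = e.toNat := by omega
    rw [he0]
    apply List.map_congr_left
    intro j hj
    rw [List.mem_range] at hj
    simp only [Function.comp_apply]
    have hz : ((0:Int) + (j:Nat)) = ((j:Nat):Int) := by omega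
    rw [hz, ← hkc, PySem.Int.floordiv_natCast]
    have hL1 : ((ls.length : Nat) : Int) - 1 = ((ls.length - 1 : Nat) : Int) := by
      have h1 : 1 ≤ ls.length := by omega
      omega
    rw [hL1, ← Nat.cast_min, PySem.List.pyGet?_natCast]
    have hidx : min (j / k) (ls.length - 1) < ls.length := by omega
    rw [List.getElem?_eq_getElem hidx, List.getD_eq_getElem ls 'A' hidx]
  rw [hA, hB]
  exact pvBlocksEqMap ls hpos k e.toNat hk1 hle

theorem assign_annotator_spec : Claim_unchanged_assign_annotator := by
  intro a e _ hpre
  unfold Spec_assign_annotator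
  intro hnd
  unfold D_assign_annotator at hnd
  obtain ⟨ha0, hr⟩ := hpre
  by_cases ha : 1 ≤ a
  · by_cases he : 1 ≤ e
    · by_cases hn : 1 ≤ PySem.Int.floordiv e a
      · exact pvCaseMain a e ha he hn
      · have hnn := (pvNum_nonneg_mul_le a e ha (by omega)).1
        apply pvCaseLast a e he (by omega)
        rw [pvLetters_nonneg a (by omega)]
        apply List.ne_nil_of_length_pos
        rw [pvTakeLen]
        omega
    · exact pvCaseEmpty a e (by omega)
        (Or.inl (by have := pvNum_nonpos a e ha (by omega); omega))
  · have ha' : a ≤ -1 := by omega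
    by_cases he : 1 ≤ e
    · have hm : -25 ≤ a := by
        rcases hr with h | h
        · exact h
        · omega
      apply pvCaseLast a e he (by have := pvNum_neg a e ha' he; omega)
      rw [pvLetters_neg a ha']
      apply List.ne_nil_of_length_pos
      rw [pvTakeLen]
      omega
    · by_cases hbig : a ≤ -26
      · refine pvCaseEmpty a e (by omega) (Or.inr ?_)
        rw [pvLetters_neg a ha']
        have h0 : 26 - a.natAbs = 0 := by omega
        rw [h0, List.take_zero]
      · have hea : ¬ (e ≤ a) := fun hea => hnd ⟨by omega, ha', hea⟩
        exact pvCaseEmpty a e (by omega)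
          (Or.inl (by rw [pvNum_zero a e ha' (by omega) (by omega)]; rfl))

theorem assign_annotator_changed : Claim_changed_assign_annotator := by
  unfold Claim_changed_assign_annotator; decide

theorem assign_annotator_tight : Claim_exact_assign_annotator := by
  intro a e _ _ hD
  unfold D_assign_annotator at hD
  obtain ⟨h1, h2, h3⟩ := hD
  have hB : assign_annotator_alt a e = [] := by
    simp only [assign_annotator_alt]
    rw [if_pos (by omega : max e 0 = 0)]
  have hnum := pvNum_pos a e h2 h3
  obtain ⟨ls, hls⟩ : ∃ l, l = PySem.List.slice pvUpper none (some a) := ⟨_, rfl⟩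
  have hlsT : ls = pvUpper.take (26 - a.natAbs) := by rw [hls, pvLetters_neg a h2]
  have hlen : ls.length = 26 - a.natAbs := by
    rw [hlsT, pvTakeLen]
    omega
  have hAres : assign_annotator a e =
      ls.flatMap (fun c => List.replicate (PySem.Int.floordiv e a).toNat (String.ofList [c])) := by
    simp only [assign_annotator, pvLoopA_eq, ← hls, List.nil_append, pvFlatLen]
    rw [if_neg (by omega)]
  rw [hAres, hB]
  intro hcontra
  have hl := congrArg List.length hcontra
  rw [pvFlatLen, List.length_nil] at hl
  rcases Nat.mul_eq_zero.mp hl with h | h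
  · omega
  · omega
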